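-- pv_equiv track=rewrite | github.com/guiferviz/iq_use_your_head | src/use_your_head/iq_use_your_head.py | generar_variantes
-- ===== SOURCE A (Python) =====
-- def normalizar(pieza):
--     """Normaliza las coordenadas de la pieza para que la 0,0 sea la primera celda que se encuentre iterando filas y columnas por ese orden."""
--     min_row, min_col = sorted(pieza)[0]
--     # min_row = min(r for r, _ in pieza)
--     # min_col = min(c for _, c in pieza)
--     return normalizar_respecto_a(pieza, min_row, min_col)
--
-- def normalizar_respecto_a(pieza, row, col):
--     return [(r - row, c - col) for r, c in pieza]
--
-- def rotar_pieza(pieza):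
--     """Rota la pieza 90 grados en sentido horario y la normaliza."""
--     return normalizar([(col, -row) for row, col in pieza])
--
-- def espejar_horizontal(pieza):
--     """Genera el espejo horizontal de la pieza y la normaliza."""
--     return normalizar([(row, -col) for row, col in pieza])
--
-- def generar_variantes(pieza):
--     """Genera todas las variantes de una pieza (rotaciones y espejos)."""
--     variantes = set()
--     actual = pieza
--     for _ in range(4):
--         variantes.add(tuple(sorted(actual)))
--         variantes.add(tuple(sorted(espejar_horizontal(actual))))
--         actual = rotar_pieza(actual)
--     return list(variantes)
-- ===== SOURCE B (Python) =====
-- def generar_variantes(pieza):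
--     """Genera todas las variantes de una pieza (rotaciones y espejos).
--
--     Applies each of the 7 non-identity dihedral coordinate transforms directly
--     to the input and canonicalizes it (translate so the lexicographically first
--     cell is (0,0), then sort); the piece itself is included as given (sorted but
--     untranslated), as in the original. Returns list(set) of the variants."""
--     def canon(p):
--         r0, c0 = sorted(p)[0]
--         return tuple(sorted((r - r0, c - c0) for r, c in p))
--
--     transforms = [
--         lambda r, c: (r, -c),    # mirror
--         lambda r, c: (c, -r),    # rot90
--         lambda r, c: (c, r),     # mirror . rot90
--         lambda r, c: (-r, -c),   # rot180
--         lambda r, c: (-r, c),    # mirror . rot180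
--         lambda r, c: (-c, r),    # rot270
--         lambda r, c: (-c, -r),   # mirror . rot270
--     ]
--     variantes = {tuple(sorted(pieza))}
--     for t in transforms:
--         variantes.add(canon([t(r, c) for r, c in pieza]))
--     return list(variantes)
-- ===== Notes on version B (the rewrite author's own statement) =====
-- stated objective: simpler
-- what changed: B drops the mutable rotate-accumulator loop: it applies each of the 7 non-identity dihedral coordinate transforms directly to the input and canonicalizes the result, seeding the set with the sorted input itself (Pre_ only excludes the empty list, on which both raise IndexError).
import Mathlib
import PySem

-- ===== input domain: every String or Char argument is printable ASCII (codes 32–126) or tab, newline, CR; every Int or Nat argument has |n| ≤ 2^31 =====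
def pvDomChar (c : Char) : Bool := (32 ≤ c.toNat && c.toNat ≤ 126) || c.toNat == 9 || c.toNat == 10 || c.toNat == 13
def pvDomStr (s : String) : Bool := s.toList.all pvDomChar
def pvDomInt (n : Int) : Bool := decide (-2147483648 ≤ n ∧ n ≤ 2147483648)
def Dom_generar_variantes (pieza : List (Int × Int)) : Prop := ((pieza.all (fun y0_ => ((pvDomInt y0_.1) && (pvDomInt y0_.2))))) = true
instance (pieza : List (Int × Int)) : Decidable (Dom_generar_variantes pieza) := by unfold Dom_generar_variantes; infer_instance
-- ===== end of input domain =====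

-- B drops A's mutable rotate-accumulator loop: each of the 7 non-identity dihedral
-- transforms is applied directly to the input and canonicalized (objective: simpler).

-- Python compares int pairs lexicographically: sort key = toLex
def pvKey (p : Int × Int) : Lex (Int × Int) := toLex p

-- sorted(xs) on a list of int pairs (shared library call of both versions)
def pvSorted (xs : List (Int × Int)) : List (Int × Int) :=
  PySem.List.sorted xs pvKey false

-- ===== PORT A =====
def normalizar_respecto_a (pieza : List (Int × Int)) (row col : Int) : List (Int × Int) :=
  pieza.map (fun rc => (rc.1 - row, rc.2 - col))

def normalizar (pieza : List (Int × Int)) : List (Int × Int) :=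
  match pvSorted pieza with
  | [] => []                          -- Python raises IndexError here; excluded by Pre_
  | (r, c) :: _ => normalizar_respecto_a pieza r c

def rotar_pieza (pieza : List (Int × Int)) : List (Int × Int) :=
  normalizar (pieza.map (fun rc => (rc.2, -rc.1)))

def espejar_horizontal (pieza : List (Int × Int)) : List (Int × Int) :=
  normalizar (pieza.map (fun rc => (rc.1, -rc.2)))

def generar_variantes (pieza : List (Int × Int)) : List (List (Int × Int)) :=
  ((List.range 4).foldl
    (fun (st : PySem.Set (List (Int × Int)) × List (Int × Int)) _ =>
      (((st.1.add (pvSorted st.2)).add (pvSorted (espejar_horizontal st.2))),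
       rotar_pieza st.2))
    (PySem.Set.empty, pieza)).1

-- ===== PORT B =====
def pvCanon (p : List (Int × Int)) : List (Int × Int) :=
  match pvSorted p with
  | [] => []                          -- Python raises IndexError here; excluded by Pre_
  | (r0, c0) :: _ => pvSorted (p.map (fun rc => (rc.1 - r0, rc.2 - c0)))

def pvTransforms : List ((Int × Int) → (Int × Int)) :=
  [ fun rc => (rc.1, -rc.2)      -- mirror
  , fun rc => (rc.2, -rc.1)      -- rot90
  , fun rc => (rc.2, rc.1)       -- mirror . rot90
  , fun rc => (-rc.1, -rc.2)     -- rot180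
  , fun rc => (-rc.1, rc.2)      -- mirror . rot180
  , fun rc => (-rc.2, rc.1)      -- rot270
  , fun rc => (-rc.2, -rc.1) ]   -- mirror . rot270

def generar_variantes_alt (pieza : List (Int × Int)) : List (List (Int × Int)) :=
  pvTransforms.foldl
    (fun (s : PySem.Set (List (Int × Int))) t => s.add (pvCanon (pieza.map t)))
    (PySem.Set.ofList [pvSorted pieza])

-- ===== PRECONDITION & SPEC =====
-- Pre_ excludes only the empty list, on which A (and B) raise IndexError via sorted(pieza)[0].
def Pre_generar_variantes (pieza : List (Int × Int)) : Prop := pieza ≠ []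
instance (pieza : List (Int × Int)) : Decidable (Pre_generar_variantes pieza) := by unfold Pre_generar_variantes; infer_instance
def pvWitness_generar_variantes : (List (Int × Int)) := ([((0:Int), (0:Int)), ((0:Int), (1:Int))])

def Spec_generar_variantes (pieza : List (Int × Int)) (out : List (List (Int × Int))) : Prop := out = generar_variantes_alt pieza
instance (pieza : List (Int × Int)) (out : List (List (Int × Int))) : Decidable (Spec_generar_variantes pieza out) := by unfold Spec_generar_variantes; infer_instance

-- ===== CLAIM (what is proved, stated in full; the proofs are below) =====
def Claim_equal_generar_variantes : Prop := ∀ (pieza : List (Int × Int)), Dom_generar_variantes pieza → Pre_generar_variantes pieza → Spec_generar_variantes pieza (generar_variantes pieza)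

-- ===== LEMMAS AND PROOFS =====

-- The sort comparison is invariant under translating both pairs
lemma pvKey_lt_sub (x y : Int × Int) (a b : Int) :
    ((pvKey (x.1 - a, x.2 - b) < pvKey (y.1 - a, y.2 - b)) ↔ (pvKey x < pvKey y)) := by
  simp only [pvKey, Prod.Lex.toLex_lt_toLex]
  omega

lemma insertBy_map_sub (x : Int × Int) (a b : Int) (l : List (Int × Int)) :
    PySem.List.insertBy (fun u v => decide (pvKey u < pvKey v))
      (x.1 - a, x.2 - b) (l.map (fun rc => (rc.1 - a, rc.2 - b)))
    = (PySem.List.insertBy (fun u v => decide (pvKey u < pvKey v)) x l).map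
        (fun rc => (rc.1 - a, rc.2 - b)) := by
  induction l with
  | nil => rfl
  | cons y ys ih =>
    simp only [List.map_cons, PySem.List.insertBy]
    rw [show (decide (pvKey (x.1 - a, x.2 - b) < pvKey (y.1 - a, y.2 - b)))
          = decide (pvKey x < pvKey y) from decide_eq_decide.mpr (pvKey_lt_sub x y a b)]
    by_cases h : pvKey x < pvKey y
    · simp [h]
    · simp [h, ih]

-- sorted commutes with translation (translation is strictly monotone for the lex order)
lemma sorted_map_sub (l : List (Int × Int)) (a b : Int) :
    pvSorted (l.map (fun rc => (rc.1 - a, rc.2 - b)))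
    = (pvSorted l).map (fun rc => (rc.1 - a, rc.2 - b)) := by
  simp only [pvSorted, PySem.List.sorted, Bool.false_eq_true, if_false]
  have key : ∀ (l acc : List (Int × Int)),
      List.foldl (fun acc x => PySem.List.insertBy (fun u v => decide (pvKey u < pvKey v)) x acc)
        (acc.map (fun rc => (rc.1 - a, rc.2 - b))) (l.map (fun rc => (rc.1 - a, rc.2 - b)))
      = (List.foldl (fun acc x => PySem.List.insertBy (fun u v => decide (pvKey u < pvKey v)) x acc)
          acc l).map (fun rc => (rc.1 - a, rc.2 - b)) := by
    intro l
    induction l with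
    | nil => intro acc; rfl
    | cons x xs ih =>
      intro acc
      simp only [List.map_cons, List.foldl_cons]
      rw [insertBy_map_sub x a b acc]
      exact ih _
  exact key l []

lemma sorted_nra (l : List (Int × Int)) (a b : Int) :
    pvSorted (normalizar_respecto_a l a b) = normalizar_respecto_a (pvSorted l) a b := by
  simp only [normalizar_respecto_a]; exact sorted_map_sub l a b

-- normalizing a translated piece = normalizing the piece
lemma norm_nra (l : List (Int × Int)) (a b : Int) :
    normalizar (normalizar_respecto_a l a b) = normalizar l := by
  simp only [normalizar, sorted_nra]
  cases h : pvSorted l with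
  | nil => simp [normalizar_respecto_a]
  | cons p t =>
    simp only [normalizar_respecto_a, List.map_cons, List.map_map]
    apply List.map_congr_left
    intro x _
    simp only [Function.comp, Prod.mk.injEq]
    constructor <;> first | trivial | omega

-- a transform that commutes with translation may be pushed past normalizar
lemma norm_map_norm (g : (Int × Int) → (Int × Int)) (a' b' : Int → Int → Int)
    (hg : ∀ (x : Int × Int) (a b : Int), g (x.1 - a, x.2 - b) = ((g x).1 - a' a b, (g x).2 - b' a b))
    (l : List (Int × Int)) :
    normalizar ((normalizar l).map g) = normalizar (l.map g) := by
  cases h : pvSorted l with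
  | nil =>
    have hl : l = [] := by
      have hp := PySem.List.sorted_perm l pvKey false
      rw [pvSorted] at h
      rw [h] at hp
      exact hp.symm.eq_nil
    subst hl; rfl
  | cons p t =>
    have hn : normalizar l = normalizar_respecto_a l p.1 p.2 := by
      simp only [normalizar, h]
    have hc : (normalizar_respecto_a l p.1 p.2).map g
        = normalizar_respecto_a (l.map g) (a' p.1 p.2) (b' p.1 p.2) := by
      simp only [normalizar_respecto_a, List.map_map]
      apply List.map_congr_left
      intro x _
      simpa using hg x p.1 p.2
    rw [hn, hc, norm_nra]

lemma norm_rot_norm (l : List (Int × Int)) :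
    normalizar ((normalizar l).map (fun rc => (rc.2, -rc.1)))
    = normalizar (l.map (fun rc => (rc.2, -rc.1))) := by
  apply norm_map_norm _ (fun a b => b) (fun a b => -a)
  intro x a b; simp only [Prod.mk.injEq]; constructor <;> first | trivial | omega

lemma norm_mir_norm (l : List (Int × Int)) :
    normalizar ((normalizar l).map (fun rc => (rc.1, -rc.2)))
    = normalizar (l.map (fun rc => (rc.1, -rc.2))) := by
  apply norm_map_norm _ (fun a b => a) (fun a b => -b)
  intro x a b; simp only [Prod.mk.injEq]; constructor <;> first | trivial | omega

lemma canon_eq (l : List (Int × Int)) : pvCanon l = pvSorted (normalizar l) := by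
  unfold pvCanon normalizar normalizar_respecto_a
  cases h : pvSorted l with
  | nil => rfl
  | cons p t => rfl

-- ===== VERDICT (by name: the statement is the Claim_ definition above) =====
theorem generar_variantes_spec : Claim_equal_generar_variantes := by
  intro pieza _ _
  unfold Spec_generar_variantes generar_variantes generar_variantes_alt pvTransforms
  simp only [List.range_succ, List.range_zero, List.nil_append, List.foldl_cons,
    List.foldl_nil, List.cons_append]
  -- name the four loop states of A
  have e0 : espejar_horizontal pieza
      = normalizar (pieza.map (fun rc => (rc.1, -rc.2))) := rfl
  have r1 : rotar_pieza pieza = normalizar (pieza.map (fun rc => (rc.2, -rc.1))) := rfl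
  have r2 : rotar_pieza (rotar_pieza pieza)
      = normalizar (pieza.map (fun rc => (-rc.1, -rc.2))) := by
    show normalizar ((normalizar (pieza.map (fun rc => (rc.2, -rc.1)))).map
          (fun rc => (rc.2, -rc.1))) = _
    rw [norm_rot_norm]
    rw [List.map_map]
    rfl
  have r3 : rotar_pieza (rotar_pieza (rotar_pieza pieza))
      = normalizar (pieza.map (fun rc => (-rc.2, rc.1))) := by
    rw [r2]
    show normalizar ((normalizar (pieza.map (fun rc => (-rc.1, -rc.2)))).map
          (fun rc => (rc.2, -rc.1))) = _
    rw [norm_rot_norm]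
    rw [List.map_map]
    congr 1
    apply List.map_congr_left; intro x _
    simp only [Function.comp_apply, Prod.mk.injEq]
    constructor <;> first | trivial | omega
  have e1 : espejar_horizontal (rotar_pieza pieza)
      = normalizar (pieza.map (fun rc => (rc.2, rc.1))) := by
    rw [r1]
    show normalizar ((normalizar (pieza.map (fun rc => (rc.2, -rc.1)))).map
          (fun rc => (rc.1, -rc.2))) = _
    rw [norm_mir_norm]
    rw [List.map_map]
    congr 1
    apply List.map_congr_left; intro x _
    simp only [Function.comp_apply, Prod.mk.injEq]
    constructor <;> first | trivial | omega
  have e2 : espejar_horizontal (rotar_pieza (rotar_pieza pieza))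
      = normalizar (pieza.map (fun rc => (-rc.1, rc.2))) := by
    rw [r2]
    show normalizar ((normalizar (pieza.map (fun rc => (-rc.1, -rc.2)))).map
          (fun rc => (rc.1, -rc.2))) = _
    rw [norm_mir_norm]
    rw [List.map_map]
    congr 1
    apply List.map_congr_left; intro x _
    simp only [Function.comp_apply, Prod.mk.injEq]
    constructor <;> first | trivial | omega
  have e3 : espejar_horizontal (rotar_pieza (rotar_pieza (rotar_pieza pieza)))
      = normalizar (pieza.map (fun rc => (-rc.2, -rc.1))) := by
    rw [r3]
    show normalizar ((normalizar (pieza.map (fun rc => (-rc.2, rc.1)))).map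
          (fun rc => (rc.1, -rc.2))) = _
    rw [norm_mir_norm]
    rw [List.map_map]
    rfl
  rw [e3, r3, e2, r2, e1, r1, e0]
  simp only [canon_eq]
  rfl
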